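-- pv_equiv track=rewrite | github.com/JHAMILCALI/MATERIAL_INFORMATICA | PRIMER SEMESTRE/INF-111 PROGRAMACION 1/LABORATORIO/LABORATORIO 8/Ejercio 5.py | clasicamqj
-- ===== SOURCE A (Python) =====
-- def clasicamqj(wmqj):
--     tmqj=1; pmqj=1
--     for imqj in range(wmqj):
--         kmqj = tmqj
--         pmqj = pmqj + 1
--         if pmqj>tmqj:
--             tmqj=tmqj+1
--             pmqj=1
--     return kmqj
-- ===== SOURCE B (Python) =====
-- def clasicamqj(wmqj):
--     # level after w steps = least m >= 1 with m*(m+1)//2 >= w, found by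
--     # exponential + binary search (O(log w) instead of A's O(w) simulation).
--     lo, hi = 1, 1
--     while hi * (hi + 1) < 2 * wmqj:
--         hi *= 2
--     while lo < hi:
--         mid = (lo + hi) // 2
--         if mid * (mid + 1) >= 2 * wmqj:
--             hi = mid
--         else:
--             lo = mid + 1
--     return lo
-- ===== Notes on version B (the rewrite author's own statement) =====
-- stated objective: faster
-- what changed: A simulates the level counter one step at a time for w iterations; B computes the same level directly as the least m whose triangular number is at least w, found by exponential doubling plus binary search.
-- outside the precondition, e.g. on clasicamqj(0): A raises UnboundLocalError, B returns 1
import Mathlib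
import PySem

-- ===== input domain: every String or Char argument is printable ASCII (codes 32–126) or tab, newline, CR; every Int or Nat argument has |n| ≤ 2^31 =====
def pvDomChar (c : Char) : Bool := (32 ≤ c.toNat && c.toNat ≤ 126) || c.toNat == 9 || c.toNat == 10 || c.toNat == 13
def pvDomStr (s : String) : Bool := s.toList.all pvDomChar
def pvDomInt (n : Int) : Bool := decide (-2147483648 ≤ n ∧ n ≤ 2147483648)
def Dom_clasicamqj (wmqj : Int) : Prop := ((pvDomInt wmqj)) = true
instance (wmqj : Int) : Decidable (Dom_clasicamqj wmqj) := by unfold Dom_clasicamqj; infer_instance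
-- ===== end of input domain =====

-- B replaces A's O(w) step-by-step simulation with an exponential + binary
-- search for the least level m with m*(m+1) ≥ 2*w (objective: faster).

-- ===== PORT A =====
-- state (kmqj, tmqj, pmqj); kmqj starts as junk 0 (Python leaves it unbound;
-- Pre_ requires wmqj ≥ 1 so the loop always assigns it before the return)
def clasicamqj (wmqj : Int) : Int :=
  ((PySem.List.pyRange 0 wmqj 1).foldl
    (fun (st : Int × Int × Int) _ =>
      let k := st.2.1
      let p := st.2.2 + 1
      if p > st.2.1 then (k, st.2.1 + 1, 1) else (k, st.2.1, p))
    (0, 1, 1)).1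

-- ===== PORT B =====
-- first while loop of B: double hi until hi*(hi+1) ≥ 2*w.  The Nat argument
-- is fuel making the loop total; (2*w).toNat + 1 steps always suffice.
def pvExpHi (wmqj : Int) : Nat → Int → Int
  | 0, hi => hi
  | fuel + 1, hi =>
    if hi * (hi + 1) < 2 * wmqj then pvExpHi wmqj fuel (hi * 2) else hi

-- second while loop of B: binary search for the least m with m*(m+1) ≥ 2*w.
-- The Nat argument is fuel; (hi - lo).toNat steps always suffice.
def pvBinSearch (wmqj : Int) : Nat → Int → Int → Int
  | 0, lo, _ => lo
  | fuel + 1, lo, hi =>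
    if lo < hi then
      let mid := PySem.Int.floordiv (lo + hi) 2
      if mid * (mid + 1) ≥ 2 * wmqj then pvBinSearch wmqj fuel lo mid
      else pvBinSearch wmqj fuel (mid + 1) hi
    else lo

def clasicamqj_alt (wmqj : Int) : Int :=
  let hi := pvExpHi wmqj ((2 * wmqj).toNat + 1) 1
  pvBinSearch wmqj (hi - 1).toNat 1 hi

-- ===== PRECONDITION & SPEC =====
-- Pre_ excludes wmqj ≤ 0, where A's loop never runs and the return of the
-- unbound kmqj raises UnboundLocalError.
def Pre_clasicamqj (wmqj : Int) : Prop := 1 ≤ wmqj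
instance (wmqj : Int) : Decidable (Pre_clasicamqj wmqj) := by unfold Pre_clasicamqj; infer_instance
def pvWitness_clasicamqj : Int := (3)

def Spec_clasicamqj (wmqj : Int) (out : Int) : Prop := out = clasicamqj_alt wmqj
instance (wmqj : Int) (out : Int) : Decidable (Spec_clasicamqj wmqj out) := by unfold Spec_clasicamqj; infer_instance

-- ===== CLAIM (what is proved, stated in full; the proofs are below) =====
def Claim_equal_clasicamqj : Prop := ∀ (wmqj : Int), Dom_clasicamqj wmqj → Pre_clasicamqj wmqj → Spec_clasicamqj wmqj (clasicamqj wmqj)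

-- ===== LEMMAS AND PROOFS =====

-- the loop body of A
def pvStep (st : Int × Int × Int) : Int × Int × Int :=
  let k := st.2.1
  let p := st.2.2 + 1
  if p > st.2.1 then (k, st.2.1 + 1, 1) else (k, st.2.1, p)

-- loop invariant of A: after n steps the state is ((p=1 ? t-1 : t), t, p)
-- with 1 ≤ p ≤ t and 2n = (t-1)t + 2(p-1)
def pvInv (n : Int) (st : Int × Int × Int) : Prop :=
  ∃ t p : Int, st = ((if p = 1 then t - 1 else t), t, p) ∧
    1 ≤ p ∧ p ≤ t ∧ 2 * n = (t - 1) * t + 2 * (p - 1)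

lemma pvStep_inv (n : Int) (st : Int × Int × Int) (h : pvInv n st) :
    pvInv (n + 1) (pvStep st) := by
  obtain ⟨t, p, hst, hp1, hpt, hn⟩ := h
  subst hst
  unfold pvStep
  by_cases hb : p + 1 > t
  · have hpt' : p = t := by omega
    refine ⟨t + 1, 1, ?_, by omega, by omega, ?_⟩
    · simp [hb]
    · have : (t + 1 - 1) * (t + 1) = (t - 1) * t + 2 * t := by ring
      subst hpt'; linarith
  · refine ⟨t, p + 1, ?_, by omega, by omega, by linarith⟩
    have hne : ¬ (p + 1 = 1) := by omega
    simp [hb, hne]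

lemma pvFold_inv (n : Nat) :
    pvInv (n : Int)
      ((PySem.List.pyRange 0 (n : Int) 1).foldl (fun st _ => pvStep st) (0, 1, 1)) := by
  induction n with
  | zero =>
      simp
      exact ⟨1, 1, by norm_num, by omega, by omega, by ring⟩
  | succ m ih =>
      have hsplit : PySem.List.pyRange 0 ((m : Int) + 1) 1
          = PySem.List.pyRange 0 (m : Int) 1 ++ [(m : Int)] :=
        PySem.List.pyRange_one_succ_right (by positivity)
      push_cast
      rw [hsplit, List.foldl_append]
      simpa using pvStep_inv (m : Int) _ ih

-- characterization of A's result for w ≥ 1: it is the least level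
lemma clasicamqj_char (w : Int) (hw : 1 ≤ w) :
    1 ≤ clasicamqj w ∧ (clasicamqj w - 1) * clasicamqj w < 2 * w ∧
      2 * w ≤ clasicamqj w * (clasicamqj w + 1) := by
  have hcast : ((w.toNat : Int)) = w := Int.toNat_of_nonneg (by omega)
  have h := pvFold_inv w.toNat
  rw [hcast] at h
  have hdef : clasicamqj w
      = ((PySem.List.pyRange 0 w 1).foldl (fun st _ => pvStep st) (0, 1, 1)).1 := by
    unfold clasicamqj pvStep; rfl
  obtain ⟨t, p, hst, hp1, hpt, hn⟩ := h
  rw [hdef, hst]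
  by_cases hp : p = 1
  · subst hp
    have h11 : (if (1:Int) = 1 then t - 1 else t) = t - 1 := if_pos rfl
    rw [h11]
    have ht2 : 2 ≤ t := by nlinarith
    refine ⟨by omega, by nlinarith, by nlinarith⟩
  · rw [if_neg hp]
    have hp2 : 2 ≤ p := by omega
    refine ⟨by omega, by nlinarith, by nlinarith⟩

-- the doubling loop reaches a bound 1 ≤ H with 2*w ≤ H*(H+1)
lemma pvExpHi_spec (w : Int) : ∀ (fuel : Nat) (hi : Int), 1 ≤ hi →
    (2 * w - hi).toNat ≤ fuel →
    1 ≤ pvExpHi w fuel hi ∧ 2 * w ≤ pvExpHi w fuel hi * (pvExpHi w fuel hi + 1) := by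
  intro fuel
  induction fuel with
  | zero =>
      intro hi h1 hf
      rw [pvExpHi]
      have : 2 * w ≤ hi := by omega
      exact ⟨h1, by nlinarith⟩
  | succ n ih =>
      intro hi h1 hf
      rw [pvExpHi]
      by_cases hc : hi * (hi + 1) < 2 * w
      · rw [if_pos hc]
        have h2 : 2 * hi ≤ hi * (hi + 1) := by nlinarith
        exact ih (hi * 2) (by omega) (by omega)
      · rw [if_neg hc]
        exact ⟨h1, by omega⟩

-- the binary search returns the unique least level k, given enough fuel
lemma pvBinSearch_eq (w k : Int) (hk1 : 1 ≤ k)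
    (hup : 2 * w ≤ k * (k + 1))
    (hlow : ∀ m : Int, 1 ≤ m → m < k → m * (m + 1) < 2 * w) :
    ∀ (fuel : Nat) (lo hi : Int), (hi - lo).toNat ≤ fuel → 1 ≤ lo → lo ≤ k → k ≤ hi →
      pvBinSearch w fuel lo hi = k := by
  intro fuel
  induction fuel with
  | zero =>
      intro lo hi hf hlo1 hlok hkhi
      rw [pvBinSearch]
      omega
  | succ n ih =>
      intro lo hi hf hlo1 hlok hkhi
      rw [pvBinSearch]
      by_cases h : lo < hi
      · rw [if_pos h]
        have hb := PySem.Int.floordiv_two_mid_bounds (lo := lo) (hi := hi) (by omega)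
        have hlt : PySem.Int.floordiv (lo + hi) 2 < hi := by
          rw [PySem.Int.floordiv_lt_iff_lt_mul (by omega)]; omega
        set mid := PySem.Int.floordiv (lo + hi) 2 with hmid
        by_cases hcond : mid * (mid + 1) ≥ 2 * w
        · rw [if_pos hcond]
          have hkmid : k ≤ mid := by
            by_contra hkm
            have := hlow mid (by omega) (by omega)
            omega
          exact ih lo mid (by omega) hlo1 hlok hkmid
        · rw [if_neg hcond]
          have hmidk : mid < k := by
            by_contra hkm
            have hkm' : k ≤ mid := by omega
            nlinarith
          exact ih (mid + 1) hi (by omega) (by omega) (by omega) hkhi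
      · rw [if_neg h]
        omega

-- ===== VERDICT (by name: the statement is the Claim_ definition above) =====
theorem clasicamqj_spec : Claim_equal_clasicamqj := by
  intro w _ hpre
  unfold Spec_clasicamqj
  obtain ⟨hk1, hlowA, hupA⟩ := clasicamqj_char w hpre
  set k := clasicamqj w with hk
  unfold clasicamqj_alt
  obtain ⟨hH1, hHup⟩ := pvExpHi_spec w ((2 * w).toNat + 1) 1 (by omega) (by omega)
  set H := pvExpHi w ((2 * w).toNat + 1) 1 with hH
  have hkH : k ≤ H := by
    by_contra hc
    have hc' : H < k := by omega
    nlinarith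
  have hlow : ∀ m : Int, 1 ≤ m → m < k → m * (m + 1) < 2 * w := by
    intro m hm1 hmk
    nlinarith
  exact (pvBinSearch_eq w k hk1 hupA hlow (H - 1).toNat 1 H (by omega) (by omega) (by omega) hkH).symm
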